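-- pv_equiv track=rewrite | github.com/tomas-balaz/pks_pcap | comm_finder.py | contains_flag
-- ===== SOURCE A (Python) =====
-- def contains_flag(all_flags, requested_flags):
--     for fl in requested_flags:
--         if fl == 'syn':
--             if int(all_flags, 16) & (1 << 1) != 0:
--                 return True
--         elif fl == 'rst':
--             if int(all_flags, 16) & (1 << 2) != 0:
--                 return True
--         elif fl == 'fin':
--             if int(all_flags, 16) & 1 != 0:
--                 return True
--     return False
-- ===== SOURCE B (Python) =====
-- _FLAG_BITS = {'syn': 1 << 1, 'rst': 1 << 2, 'fin': 1}
--
--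
-- def contains_flag(all_flags, requested_flags):
--     # Pass 1: accumulate a combined bitmask of all recognized requested flags.
--     mask = 0
--     for fl in requested_flags:
--         mask |= _FLAG_BITS.get(fl, 0)
--     # Pass 2: a single parse and one aggregate bit test (never parses when no
--     # recognized flag was requested, matching A's exception behaviour).
--     if mask == 0:
--         return False
--     return int(all_flags, 16) & mask != 0
-- ===== Notes on version B (the rewrite author's own statement) =====
-- stated objective: alternative
-- what changed: Replaces A's interleaved per-element dispatch (branch chain with a bit-test-and-early-return, re-parsing the hex string at each recognized flag) by a two-stage algorithm: one accumulation pass OR-ing per-flag bits from a lookup table into a single mask, then one guarded parse and one aggregate test (value & mask) != 0.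
import Mathlib
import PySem

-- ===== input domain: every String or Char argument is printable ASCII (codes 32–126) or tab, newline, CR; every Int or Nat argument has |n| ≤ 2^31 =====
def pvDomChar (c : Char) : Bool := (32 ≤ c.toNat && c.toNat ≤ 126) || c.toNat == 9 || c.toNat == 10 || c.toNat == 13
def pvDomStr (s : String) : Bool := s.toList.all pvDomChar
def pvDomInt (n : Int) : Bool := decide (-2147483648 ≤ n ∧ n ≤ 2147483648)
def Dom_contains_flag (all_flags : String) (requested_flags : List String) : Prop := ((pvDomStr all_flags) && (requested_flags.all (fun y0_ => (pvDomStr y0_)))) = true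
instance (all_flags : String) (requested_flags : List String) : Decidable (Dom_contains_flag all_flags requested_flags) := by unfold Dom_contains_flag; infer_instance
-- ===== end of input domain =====

-- B replaces A's interleaved dispatch/bit-test/early-return loop by two stages: an
-- accumulation pass OR-ing per-flag bits into one combined mask, then a single guarded
-- parse and one aggregate bit test; objective: alternative. Equivalence on Pre_ below.

-- ===== PORT A =====
-- int(all_flags, 16): PySem.Int.ofStrBase?; none = ValueError, excluded by Pre_ (getD 0 is never reached under Pre_ semantics).
def pvA_loop (all_flags : String) : List String → Bool
  | [] => false
  | fl :: rest =>
    if fl = "syn" then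
      if (PySem.Int.band ((PySem.Int.ofStrBase? all_flags 16).getD 0) ((1:Int) <<< 1)) ≠ 0 then true
      else pvA_loop all_flags rest
    else if fl = "rst" then
      if (PySem.Int.band ((PySem.Int.ofStrBase? all_flags 16).getD 0) ((1:Int) <<< 2)) ≠ 0 then true
      else pvA_loop all_flags rest
    else if fl = "fin" then
      if (PySem.Int.band ((PySem.Int.ofStrBase? all_flags 16).getD 0) (1:Int)) ≠ 0 then true
      else pvA_loop all_flags rest
    else pvA_loop all_flags rest

def contains_flag (all_flags : String) (requested_flags : List String) : Bool :=
  pvA_loop all_flags requested_flags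

-- ===== PORT B =====
-- _FLAG_BITS.get(fl, 0): the fixed three-entry literal dict of Source B, ported as a total
-- first-match lookup with default 0 — exact.
def pvFlagBit (fl : String) : Int :=
  if fl = "syn" then (1:Int) <<< 1 else if fl = "rst" then (1:Int) <<< 2 else if fl = "fin" then 1 else 0

def contains_flag_alt (all_flags : String) (requested_flags : List String) : Bool :=
  let mask := requested_flags.foldl (fun m fl => PySem.Int.bor m (pvFlagBit fl)) 0
  if mask = 0 then false
  else decide (PySem.Int.band ((PySem.Int.ofStrBase? all_flags 16).getD 0) mask ≠ 0)

-- ===== PRECONDITION & SPEC =====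
-- Pre_ excludes exactly the inputs where A raises ValueError: a recognized flag is
-- requested but all_flags is not a valid base-16 integer literal (B raises there too).
def Pre_contains_flag (all_flags : String) (requested_flags : List String) : Prop :=
  ("syn" ∈ requested_flags ∨ "rst" ∈ requested_flags ∨ "fin" ∈ requested_flags) →
    (PySem.Int.ofStrBase? all_flags 16).isSome = true
instance (all_flags : String) (requested_flags : List String) : Decidable (Pre_contains_flag all_flags requested_flags) := by unfold Pre_contains_flag; infer_instance

def pvWitness_contains_flag : String × List String := ("1f", ["ack", "syn"])

def Spec_contains_flag (all_flags : String) (requested_flags : List String) (out : Bool) : Prop := out = contains_flag_alt all_flags requested_flags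
instance (all_flags : String) (requested_flags : List String) (out : Bool) : Decidable (Spec_contains_flag all_flags requested_flags out) := by unfold Spec_contains_flag; infer_instance

-- ===== CLAIM (what is proved, stated in full; the proofs are below) =====
def Claim_equal_contains_flag : Prop := ∀ (all_flags : String) (requested_flags : List String), Dom_contains_flag all_flags requested_flags → Pre_contains_flag all_flags requested_flags → Spec_contains_flag all_flags requested_flags (contains_flag all_flags requested_flags)

-- ===== LEMMAS AND PROOFS =====

-- A's loop returns the disjunction of the three membership-guarded bit tests.
theorem pvA_loop_eq (all_flags : String) (l : List String) :
    pvA_loop all_flags l =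
      ((l.contains "syn" && decide (PySem.Int.band ((PySem.Int.ofStrBase? all_flags 16).getD 0) 2 ≠ 0)) ||
       (l.contains "rst" && decide (PySem.Int.band ((PySem.Int.ofStrBase? all_flags 16).getD 0) 4 ≠ 0)) ||
       (l.contains "fin" && decide (PySem.Int.band ((PySem.Int.ofStrBase? all_flags 16).getD 0) 1 ≠ 0))) := by
  have h2 : ((1:Int) <<< 1) = 2 := by decide
  have h4 : ((1:Int) <<< 2) = 4 := by decide
  induction l with
  | nil => simp [pvA_loop]
  | cons fl rest ih =>
    simp only [pvA_loop, List.contains_cons, ih, h2, h4]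
    split_ifs with hs hb hr hb hf hb <;>
      first
        | (have hs' : (("syn":String) == fl) = false := beq_eq_false_iff_ne.mpr (fun h => hs h.symm)
           have hr' : (("rst":String) == fl) = false := beq_eq_false_iff_ne.mpr (fun h => hr h.symm)
           have hf' : (("fin":String) == fl) = false := beq_eq_false_iff_ne.mpr (fun h => hf h.symm)
           simp [hs', hr', hf'])
        | simp_all

theorem pv_or_eq_zero (x y : Nat) : x ||| y = 0 ↔ x = 0 ∧ y = 0 := by
  constructor
  · intro h
    have hx : x ≤ x ||| y := Nat.left_le_or
    have hy : y ≤ x ||| y := Nat.right_le_or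
    omega
  · rintro ⟨rfl, rfl⟩; rfl

-- An AND against a mask below 8 only reads the other operand's low three bits.
theorem pv_and_seven (m w : Nat) (hm : m < 8) : m &&& w = m &&& (w % 8) := by
  have h7 : ∀ n : Nat, n &&& 7 = n % 8 := by
    intro n
    have := Nat.and_two_pow_sub_one_eq_mod n 3
    norm_num at this
    exact this
  calc m &&& w = (m % 8) &&& w := by rw [Nat.mod_eq_of_lt hm]
    _ = (m &&& 7) &&& w := by rw [h7]
    _ = m &&& (7 &&& w) := Nat.and_assoc m 7 w
    _ = m &&& (w &&& 7) := by rw [Nat.and_comm 7 w]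
    _ = m &&& (w % 8) := by rw [h7]

-- The aggregate bit test distributes over the OR of two small masks, for every Int value.
theorem pv_band_or (v : Int) (a b : Nat) (ha : a < 8) (hb : b < 8) :
    PySem.Int.band v ((a ||| b : Nat) : Int) ≠ 0 ↔
      (PySem.Int.band v (a : Int) ≠ 0 ∨ PySem.Int.band v (b : Int) ≠ 0) := by
  have hor : a ||| b < 8 := Nat.or_lt_two_pow (n := 3) ha hb
  unfold PySem.Int.band
  by_cases hv : 0 ≤ v
  · simp only [hv, Int.natCast_nonneg, if_pos]
    simp only [Int.toNat_natCast]
    have hd : v.toNat &&& (a ||| b) = (v.toNat &&& a) ||| (v.toNat &&& b) :=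
      Nat.and_or_distrib_left v.toNat a b
    simp only [hd, ne_eq, Int.natCast_eq_zero, pv_or_eq_zero, not_and_or]
  · simp only [hv, if_false, Int.natCast_nonneg, if_pos]
    simp only [Int.toNat_natCast, ne_eq, Int.natCast_eq_zero]
    rw [pv_and_seven (a ||| b) _ hor, pv_and_seven a _ ha, pv_and_seven b _ hb]
    have key : ∀ u < 8, ∀ a' < 8, ∀ b' < 8,
        (((a' ||| b') - ((a' ||| b') &&& u) ≠ 0) ↔ (a' - (a' &&& u) ≠ 0 ∨ b' - (b' &&& u) ≠ 0)) := by
      decide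
    exact key ((-v - 1).toNat % 8) (Nat.mod_lt _ (by norm_num)) a ha b hb

-- Nat-level mirror of pvFlagBit and the mask accumulated by B's first pass.
def pvFlagBitN (fl : String) : Nat :=
  if fl = "syn" then 2 else if fl = "rst" then 4 else if fl = "fin" then 1 else 0

def pvMaskN (l : List String) : Nat :=
  (if "syn" ∈ l then 2 else 0) ||| ((if "rst" ∈ l then 4 else 0) ||| (if "fin" ∈ l then 1 else 0))

theorem pvFlagBit_cast (fl : String) : pvFlagBit fl = ((pvFlagBitN fl : Nat) : Int) := by
  unfold pvFlagBit pvFlagBitN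
  split_ifs <;> decide

theorem pv_step (fl : String) (rest : List String) :
    pvFlagBitN fl ||| pvMaskN rest = pvMaskN (fl :: rest) := by
  by_cases hs : "syn" ∈ rest <;> by_cases hr : "rst" ∈ rest <;> by_cases hf : "fin" ∈ rest <;>
    by_cases h1 : fl = "syn" <;> by_cases h2 : fl = "rst" <;> by_cases h3 : fl = "fin" <;>
      simp_all [pvFlagBitN, pvMaskN, eq_comm]

-- B's accumulation pass computes the OR of the membership-guarded bits.
theorem pv_fold_mask (l : List String) (a : Nat) :
    l.foldl (fun m fl => PySem.Int.bor m (pvFlagBit fl)) ((a : Nat) : Int) = ((a ||| pvMaskN l : Nat) : Int) := by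
  induction l generalizing a with
  | nil => simp [pvMaskN]
  | cons fl rest ih =>
    have hacc : PySem.Int.bor ((a : Nat) : Int) (pvFlagBit fl) = ((a ||| pvFlagBitN fl : Nat) : Int) := by
      rw [pvFlagBit_cast, PySem.Int.bor_natCast]
    rw [List.foldl_cons, hacc, ih, ← pv_step fl rest, ← Nat.or_assoc]

theorem pv_band_mask (v : Int) (s r f : Bool) :
    (PySem.Int.band v (((cond s 2 0 ||| (cond r 4 0 ||| cond f 1 0) : Nat)) : Int) ≠ 0) ↔
      ((s = true ∧ PySem.Int.band v 2 ≠ 0) ∨ (r = true ∧ PySem.Int.band v 4 ≠ 0) ∨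
       (f = true ∧ PySem.Int.band v 1 ≠ 0)) := by
  have h1 := pv_band_or v (cond s 2 0) (cond r 4 0 ||| cond f 1 0)
    (by cases s <;> norm_num)
    (Nat.or_lt_two_pow (n := 3) (by cases r <;> norm_num) (by cases f <;> norm_num))
  have h2 := pv_band_or v (cond r 4 0) (cond f 1 0) (by cases r <;> norm_num) (by cases f <;> norm_num)
  cases s <;> cases r <;> cases f <;> simp_all

theorem pvMaskN_eq (l : List String) :
    pvMaskN l = cond (l.contains "syn") 2 0 ||| (cond (l.contains "rst") 4 0 ||| cond (l.contains "fin") 1 0) := by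
  simp only [pvMaskN, List.contains_eq_mem]
  by_cases hs : "syn" ∈ l <;> by_cases hr : "rst" ∈ l <;> by_cases hf : "fin" ∈ l <;> simp [hs, hr, hf]

theorem pv_alt_eq (af : String) (l : List String) :
    contains_flag_alt af l =
      if pvMaskN l = 0 then false
      else decide (PySem.Int.band ((PySem.Int.ofStrBase? af 16).getD 0) ((pvMaskN l : Nat) : Int) ≠ 0) := by
  unfold contains_flag_alt
  have hm : l.foldl (fun m fl => PySem.Int.bor m (pvFlagBit fl)) 0 = ((pvMaskN l : Nat) : Int) := by
    have := pv_fold_mask l 0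
    simpa using this
  rw [hm]
  simp [Int.natCast_eq_zero]

-- ===== VERDICT (by name: the statement is the Claim_ definition above) =====
theorem contains_flag_spec : Claim_equal_contains_flag := by
  intro af l _ _
  unfold Spec_contains_flag contains_flag
  rw [pvA_loop_eq, pv_alt_eq]
  have hv : (if pvMaskN l = 0 then false
      else decide (PySem.Int.band ((PySem.Int.ofStrBase? af 16).getD 0) ((pvMaskN l : Nat) : Int) ≠ 0)) =
      decide (PySem.Int.band ((PySem.Int.ofStrBase? af 16).getD 0) ((pvMaskN l : Nat) : Int) ≠ 0) := by
    by_cases hm : pvMaskN l = 0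
    · rw [if_pos hm, hm]
      simp
    · rw [if_neg hm]
  rw [hv, pvMaskN_eq, Bool.eq_iff_iff]
  simp only [Bool.or_eq_true, Bool.and_eq_true, decide_eq_true_eq]
  rw [pv_band_mask, ← or_assoc]
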